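-- pv_equiv track=rewrite | github.com/seohyun-j/Algorithm | Programmers/Level_3/70130.py | other_solution
-- ===== SOURCE A (Python) =====
-- from collections import Counter
--
-- def other_solution(a):
--     if len(a) < 4:
--         return 0
--
--     counter = Counter(a)
--     answer = -1
--     length = len(a) - 1
--
--     for key in counter.keys():
--         if counter[key] <= answer:
--             continue
--
--         i, cnt = 0, 0
--         while i < length:
--             if (a[i] == a[i + 1]) or (a[i] != key and a[i + 1] != key):
--                 i += 1
--             else:
--                 i += 2
--                 cnt += 1
--         answer = max(answer, cnt)
--
--     return answer * 2
-- ===== SOURCE B (Python) =====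
-- def other_solution(a):
--     n = len(a)
--     if n < 4:
--         return 0
--     # one pass: per-key greedy state (last taken pair index, pairs taken)
--     last = {}
--     cnt = {}
--     for i in range(n - 1):
--         if a[i] != a[i + 1]:
--             for k in (a[i], a[i + 1]):
--                 if i >= last.get(k, -2) + 2:
--                     last[k] = i
--                     cnt[k] = cnt.get(k, 0) + 1
--     return 2 * max(cnt.values(), default=0)
-- ===== Notes on version B (the rewrite author's own statement) =====
-- stated objective: alternative
-- what changed: B replaces A's per-key rescans of the whole array (guarded by a count-based prune) with a single left-to-right pass that maintains, in two dicts, each value's greedy state (last taken pair index, pairs taken) and finally takes the max of the per-key counts.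
import Mathlib
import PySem

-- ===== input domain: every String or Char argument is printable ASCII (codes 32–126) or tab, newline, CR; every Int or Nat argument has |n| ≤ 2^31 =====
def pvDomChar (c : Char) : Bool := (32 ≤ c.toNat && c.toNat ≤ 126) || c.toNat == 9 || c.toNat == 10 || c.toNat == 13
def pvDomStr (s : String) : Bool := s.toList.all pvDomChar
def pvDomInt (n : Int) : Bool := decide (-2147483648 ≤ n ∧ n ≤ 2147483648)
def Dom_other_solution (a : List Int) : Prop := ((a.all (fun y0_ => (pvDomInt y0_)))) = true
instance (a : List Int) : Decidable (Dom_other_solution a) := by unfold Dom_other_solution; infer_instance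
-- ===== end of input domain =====

-- B is an alternative one-pass algorithm (per-key greedy states in dicts) replacing A's per-key rescans; return values agree everywhere.

-- ===== PORT A =====
-- A's inner while loop: scan pairs from index i, taking a pair (i, i+1) when the two
-- elements differ and one of them is `key`, then jumping by 2; all indices are in range.
def pairLoop (a : List Int) (key : Int) (i : Nat) (cnt : Int) : Int :=
  if _h : i < a.length - 1 then
    if (a.getD i 0 == a.getD (i + 1) 0) || (a.getD i 0 != key && a.getD (i + 1) 0 != key) then
      pairLoop a key (i + 1) cnt
    else
      pairLoop a key (i + 2) (cnt + 1)
  else cnt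
termination_by a.length - 1 - i

def other_solution (a : List Int) : Int :=
  if a.length < 4 then 0
  else
    let counter := PySem.Dict.counter a
    let answer : Int := counter.keys.foldl
      (fun answer key =>
        if counter.getD key 0 ≤ answer then answer
        else max answer (pairLoop a key 0 0)) (-1)
    answer * 2

-- ===== PORT B =====
-- one step of B's pass: pair (i, i+1) differs → update the greedy state of both involved keys
def altStep (a : List Int) (st : PySem.Dict Int Int × PySem.Dict Int Int) (i : Nat) :
    PySem.Dict Int Int × PySem.Dict Int Int :=
  if a.getD i 0 != a.getD (i + 1) 0 then
    [a.getD i 0, a.getD (i + 1) 0].foldl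
      (fun st2 k =>
        if st2.1.getD k (-2) + 2 ≤ (i : Int) then
          (st2.1.insert k (i : Int), st2.2.insert k (st2.2.getD k 0 + 1))
        else st2) st
  else st

def other_solution_alt (a : List Int) : Int :=
  let n := a.length
  if n < 4 then 0
  else
    let st := (List.range (n - 1)).foldl (altStep a) (PySem.Dict.empty, PySem.Dict.empty)
    2 * st.2.values.foldl max 0

-- ===== PRECONDITION & SPEC =====
def Spec_other_solution (a : List Int) (out : Int) : Prop := out = other_solution_alt a
instance (a : List Int) (out : Int) : Decidable (Spec_other_solution a out) := by unfold Spec_other_solution; infer_instance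

-- ===== CLAIM (what is proved, stated in full; the proofs are below) =====
def Claim_equal_other_solution : Prop := ∀ (a : List Int), Dom_other_solution a → Spec_other_solution a (other_solution a)

-- ===== LEMMAS AND PROOFS =====

-- reference greedy state for key k after scanning pairs 0..m-1: (last taken index, pairs taken)
def gstate (a : List Int) (k : Int) : Nat → Int × Int
  | 0 => (-2, 0)
  | m + 1 =>
    let s := gstate a k m
    if ((a.getD m 0 != a.getD (m + 1) 0) && (a.getD m 0 == k || a.getD (m + 1) 0 == k))
        && decide (s.1 + 2 ≤ (m : Int)) then ((m : Int), s.2 + 1)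
    else s

theorem gstate_succ (a : List Int) (k : Int) (m : Nat) :
    gstate a k (m + 1) =
      (if ((a.getD m 0 != a.getD (m + 1) 0) && (a.getD m 0 == k || a.getD (m + 1) 0 == k))
          && decide ((gstate a k m).1 + 2 ≤ (m : Int)) then ((m : Int), (gstate a k m).2 + 1)
        else gstate a k m) := rfl

theorem gstate_snd_nonneg (a : List Int) (k : Int) (m : Nat) : 0 ≤ (gstate a k m).2 := by
  induction m with
  | zero => simp [gstate]
  | succ m ih =>
    simp only [gstate]
    split
    · omega
    · exact ih

theorem count_take_succ (a : List Int) (k : Int) (j : Nat) (hj : j < a.length) :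
    (a.take (j + 1)).count k = (a.take j).count k + (if a[j] = k then 1 else 0) := by
  rw [List.take_add_one, List.count_append]
  simp [List.getElem?_eq_getElem hj, List.count_singleton]

theorem count_take_mono (a : List Int) (k : Int) (j : Nat) :
    (a.take j).count k ≤ (a.take (j + 1)).count k := by
  by_cases hj : j < a.length
  · rw [count_take_succ a k j hj]
    split_ifs <;> omega
  · rw [List.take_of_length_le (by omega), List.take_of_length_le (by omega)]

theorem gstate_count_bound (a : List Int) (k : Int) :
    ∀ m : Nat, m ≤ a.length - 1 → 1 ≤ a.length →
      (gstate a k m).2 ≤ ((a.take (m + 1)).count k : Int) ∧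
        ((gstate a k m).1 + 1 < (m : Int) → (gstate a k m).2 ≤ ((a.take m).count k : Int)) := by
  intro m
  induction m with
  | zero =>
    intro _ _
    constructor
    · simp [gstate]
    · intro _; simp [gstate]
  | succ m ih =>
    intro hm hn
    have hmlt : m < a.length := by omega
    have hm1lt : m + 1 < a.length := by omega
    have ihh := ih (by omega) hn
    by_cases hc : (((a.getD m 0 != a.getD (m + 1) 0) && (a.getD m 0 == k || a.getD (m + 1) 0 == k))
        && decide ((gstate a k m).1 + 2 ≤ (m : Int))) = true
    · rw [gstate_succ, if_pos hc]
      simp only [Bool.and_eq_true, Bool.or_eq_true, bne_iff_ne, beq_iff_eq, ne_eq,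
        decide_eq_true_eq] at hc
      obtain ⟨⟨_, hk⟩, hd⟩ := hc
      have hs2 : (gstate a k m).2 ≤ ((a.take m).count k : Int) := ihh.2 (by omega)
      constructor
      · have hmono1 : (a.take m).count k ≤ (a.take (m + 1)).count k := count_take_mono a k m
        have hmono2 : (a.take (m + 1)).count k ≤ (a.take (m + 1 + 1)).count k := count_take_mono a k (m + 1)
        rcases hk with hk | hk
        · have : (a.take (m + 1)).count k = (a.take m).count k + 1 := by
            rw [count_take_succ a k m hmlt, if_pos (by rw [← List.getD_eq_getElem a 0 hmlt]; exact hk)]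
          push_cast
          omega
        · have : (a.take (m + 1 + 1)).count k = (a.take (m + 1)).count k + 1 := by
            rw [count_take_succ a k (m + 1) hm1lt,
              if_pos (by rw [← List.getD_eq_getElem a 0 hm1lt]; exact hk)]
          push_cast
          omega
      · intro hlt
        exfalso
        push_cast at hlt
        omega
    · rw [gstate_succ, if_neg hc]
      constructor
      · have hmono : (a.take (m + 1)).count k ≤ (a.take (m + 1 + 1)).count k := count_take_mono a k (m + 1)
        have := ihh.1
        push_cast at this ⊢
        omega
      · intro _
        exact ihh.1

-- A's while loop computes the greedy count difference
theorem pairLoop_eq (a : List Int) (k : Int) :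
    ∀ (d i : Nat) (c : Int), a.length - 1 - i ≤ d → i ≤ a.length - 1 →
      (gstate a k i).1 + 2 ≤ (i : Int) →
      pairLoop a k i c = c + (gstate a k (a.length - 1)).2 - (gstate a k i).2 := by
  intro d
  induction d with
  | zero =>
    intro i c hd hi _
    have hie : i = a.length - 1 := by omega
    rw [pairLoop, dif_neg (by omega)]
    subst hie
    omega
  | succ d ih =>
    intro i c hd hi hg
    by_cases h : i < a.length - 1
    · rw [pairLoop, dif_pos h]
      by_cases hcond :
          ((a.getD i 0 == a.getD (i + 1) 0) ||
            (a.getD i 0 != k && a.getD (i + 1) 0 != k)) = true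
      · rw [if_pos hcond]
        have hq : ((a.getD i 0 != a.getD (i + 1) 0) &&
            (a.getD i 0 == k || a.getD (i + 1) 0 == k)) = false := by
          simp only [List.getD_eq_getElem?_getD] at hcond ⊢
          simp only [Bool.or_eq_true, beq_iff_eq, Bool.and_eq_true, bne_iff_ne, ne_eq] at hcond
          rcases hcond with h1 | ⟨h2, h3⟩
          · simp [h1]
          · simp [h2, h3]
        have heq : gstate a k (i + 1) = gstate a k i := by
          rw [gstate_succ, hq]
          simp
        rw [ih (i + 1) c (by omega) (by omega) (by rw [heq]; push_cast; omega)]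
        rw [heq]
      · rw [if_neg hcond]
        have hq : ((a.getD i 0 != a.getD (i + 1) 0) &&
            (a.getD i 0 == k || a.getD (i + 1) 0 == k)) = true := by
          simp only [List.getD_eq_getElem?_getD] at hcond ⊢
          simp only [Bool.or_eq_true, beq_iff_eq, Bool.and_eq_true, bne_iff_ne, ne_eq,
            not_or, not_and, not_not] at hcond ⊢
          tauto
        have heq1 : gstate a k (i + 1) = ((i : Int), (gstate a k i).2 + 1) := by
          rw [gstate_succ, hq]
          simp only [Bool.true_and]
          rw [if_pos (by exact decide_eq_true hg)]
        by_cases h2 : i + 2 ≤ a.length - 1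
        · have h21 : i + 2 = (i + 1) + 1 := rfl
          have heq2 : gstate a k (i + 2) = gstate a k (i + 1) := by
            rw [h21, gstate_succ, heq1]
            rw [if_neg]
            simp only [Bool.and_eq_true, decide_eq_true_eq, not_and]
            intro _
            push_cast
            omega
          rw [ih (i + 2) (c + 1) (by omega) h2 (by rw [heq2, heq1]; push_cast; omega)]
          rw [heq2, heq1]
          omega
        · rw [pairLoop, dif_neg (by omega)]
          have hn : a.length - 1 = i + 1 := by omega
          rw [hn, heq1]
          omega
    · rw [pairLoop, dif_neg h]
      have hie : i = a.length - 1 := by omega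
      subst hie
      omega

theorem pairLoop_zero (a : List Int) (k : Int) (h : 1 ≤ a.length) :
    pairLoop a k 0 0 = (gstate a k (a.length - 1)).2 := by
  have := pairLoop_eq a k (a.length - 1) 0 0 (by omega) (by omega) (by simp [gstate])
  simpa [gstate] using this

-- B's fold invariant
def altInv (a : List Int) (m : Nat) (st : PySem.Dict Int Int × PySem.Dict Int Int) : Prop :=
  (∀ k : Int, st.1.getD k (-2) = (gstate a k m).1 ∧ st.2.getD k 0 = (gstate a k m).2) ∧
    st.2.keys.Nodup ∧ (∀ k ∈ st.2.keys, k ∈ a)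

theorem gstate_succ_qual_false (a : List Int) (k : Int) (m : Nat)
    (h : ((a.getD m 0 != a.getD (m + 1) 0) && (a.getD m 0 == k || a.getD (m + 1) 0 == k)) = false) :
    gstate a k (m + 1) = gstate a k m := by
  rw [gstate_succ, h]
  simp

theorem altStep_inv (a : List Int) (m : Nat) (hm : m + 1 ≤ a.length - 1)
    (st : PySem.Dict Int Int × PySem.Dict Int Int) (h : altInv a m st) :
    altInv a (m + 1) (altStep a st m) := by
  obtain ⟨hget, hnd, hmem⟩ := h
  have hmlt : m < a.length := by omega
  have hm1lt : m + 1 < a.length := by omega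
  have hxmem : a.getD m 0 ∈ a := by
    rw [List.getD_eq_getElem a 0 hmlt]; exact List.getElem_mem hmlt
  have hymem : a.getD (m + 1) 0 ∈ a := by
    rw [List.getD_eq_getElem a 0 hm1lt]; exact List.getElem_mem hm1lt
  unfold altStep
  by_cases hxy : (a.getD m 0 != a.getD (m + 1) 0) = true
  · rw [if_pos hxy]
    simp only [List.foldl_cons, List.foldl_nil]
    have hne : a.getD m 0 ≠ a.getD (m + 1) 0 := bne_iff_ne.mp hxy
    have hyx : a.getD (m + 1) 0 ≠ a.getD m 0 := hne.symm
    have hqx : ((a.getD m 0 != a.getD (m + 1) 0) && (a.getD m 0 == a.getD m 0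
        || a.getD (m + 1) 0 == a.getD m 0)) = true := by
      rw [hxy]; simp
    have hqy : ((a.getD m 0 != a.getD (m + 1) 0) && (a.getD m 0 == a.getD (m + 1) 0
        || a.getD (m + 1) 0 == a.getD (m + 1) 0)) = true := by
      rw [hxy]; simp
    by_cases hcx : st.1.getD (a.getD m 0) (-2) + 2 ≤ (m : Int)
    · rw [if_pos hcx]
      have hgx : gstate a (a.getD m 0) (m + 1)
          = ((m : Int), (gstate a (a.getD m 0) m).2 + 1) := by
        rw [gstate_succ, hqx]
        simp only [Bool.true_and]
        rw [if_pos (by rw [← (hget (a.getD m 0)).1]; exact decide_eq_true hcx)]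
      simp only [PySem.Dict.getD_insert, hyx, if_false]
      by_cases hcy : st.1.getD (a.getD (m + 1) 0) (-2) + 2 ≤ (m : Int)
      · rw [if_pos hcy]
        have hgy : gstate a (a.getD (m + 1) 0) (m + 1)
            = ((m : Int), (gstate a (a.getD (m + 1) 0) m).2 + 1) := by
          rw [gstate_succ, hqy]
          simp only [Bool.true_and]
          rw [if_pos (by rw [← (hget (a.getD (m + 1) 0)).1]; exact decide_eq_true hcy)]
        refine ⟨?_, ?_, ?_⟩
        · intro k
          by_cases hky : k = a.getD (m + 1) 0
          · subst hky
            simp [hgy, (hget (a.getD (m + 1) 0)).2, -List.getD_eq_getElem?_getD]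
          · by_cases hkx : k = a.getD m 0
            · subst hkx
              simp [PySem.Dict.getD_insert, hky, hgx, (hget (a.getD m 0)).2, -List.getD_eq_getElem?_getD]
            · have hq : ((a.getD m 0 != a.getD (m + 1) 0) && (a.getD m 0 == k
                  || a.getD (m + 1) 0 == k)) = false := by
                simp only [Bool.and_eq_false_iff, Bool.or_eq_false_iff, beq_eq_false_iff_ne, ne_eq]
                right
                exact ⟨fun hh => hkx hh.symm, fun hh => hky hh.symm⟩
              rw [gstate_succ_qual_false a k m hq]
              simp [PySem.Dict.getD_insert, hky, hkx, hget k, -List.getD_eq_getElem?_getD]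
        · exact PySem.Dict.nodup_keys_insert _ _ _ (PySem.Dict.nodup_keys_insert _ _ _ hnd)
        · intro k hk
          rw [PySem.Dict.mem_keys_insert] at hk
          rcases hk with hk | hk
          · subst hk; exact hymem
          · rw [PySem.Dict.mem_keys_insert] at hk
            rcases hk with hk | hk
            · subst hk; exact hxmem
            · exact hmem k hk
      · rw [if_neg hcy]
        have hgy : gstate a (a.getD (m + 1) 0) (m + 1) = gstate a (a.getD (m + 1) 0) m := by
          rw [gstate_succ, hqy]
          simp only [Bool.true_and]
          rw [if_neg (by rw [← (hget (a.getD (m + 1) 0)).1]; simpa using hcy)]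
        refine ⟨?_, ?_, ?_⟩
        · intro k
          by_cases hkx : k = a.getD m 0
          · subst hkx
            simp [hgx, (hget (a.getD m 0)).2, -List.getD_eq_getElem?_getD]
          · by_cases hky : k = a.getD (m + 1) 0
            · subst hky
              rw [hgy]
              simp [PySem.Dict.getD_insert, hyx, hget (a.getD (m + 1) 0), -List.getD_eq_getElem?_getD]
            · have hq : ((a.getD m 0 != a.getD (m + 1) 0) && (a.getD m 0 == k
                  || a.getD (m + 1) 0 == k)) = false := by
                simp only [Bool.and_eq_false_iff, Bool.or_eq_false_iff, beq_eq_false_iff_ne, ne_eq]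
                right
                exact ⟨fun hh => hkx hh.symm, fun hh => hky hh.symm⟩
              rw [gstate_succ_qual_false a k m hq]
              simp [PySem.Dict.getD_insert, hkx, hget k, -List.getD_eq_getElem?_getD]
        · exact PySem.Dict.nodup_keys_insert _ _ _ hnd
        · intro k hk
          rw [PySem.Dict.mem_keys_insert] at hk
          rcases hk with hk | hk
          · subst hk; exact hxmem
          · exact hmem k hk
    · rw [if_neg hcx]
      have hgx : gstate a (a.getD m 0) (m + 1) = gstate a (a.getD m 0) m := by
        rw [gstate_succ, hqx]
        simp only [Bool.true_and]
        rw [if_neg (by rw [← (hget (a.getD m 0)).1]; simpa using hcx)]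
      by_cases hcy : st.1.getD (a.getD (m + 1) 0) (-2) + 2 ≤ (m : Int)
      · rw [if_pos hcy]
        have hgy : gstate a (a.getD (m + 1) 0) (m + 1)
            = ((m : Int), (gstate a (a.getD (m + 1) 0) m).2 + 1) := by
          rw [gstate_succ, hqy]
          simp only [Bool.true_and]
          rw [if_pos (by rw [← (hget (a.getD (m + 1) 0)).1]; exact decide_eq_true hcy)]
        refine ⟨?_, ?_, ?_⟩
        · intro k
          by_cases hky : k = a.getD (m + 1) 0
          · subst hky
            simp [hgy, (hget (a.getD (m + 1) 0)).2, -List.getD_eq_getElem?_getD]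
          · by_cases hkx : k = a.getD m 0
            · subst hkx
              rw [hgx]
              simp [PySem.Dict.getD_insert, hky, hget (a.getD m 0), -List.getD_eq_getElem?_getD]
            · have hq : ((a.getD m 0 != a.getD (m + 1) 0) && (a.getD m 0 == k
                  || a.getD (m + 1) 0 == k)) = false := by
                simp only [Bool.and_eq_false_iff, Bool.or_eq_false_iff, beq_eq_false_iff_ne, ne_eq]
                right
                exact ⟨fun hh => hkx hh.symm, fun hh => hky hh.symm⟩
              rw [gstate_succ_qual_false a k m hq]
              simp [PySem.Dict.getD_insert, hky, hget k, -List.getD_eq_getElem?_getD]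
        · exact PySem.Dict.nodup_keys_insert _ _ _ hnd
        · intro k hk
          rw [PySem.Dict.mem_keys_insert] at hk
          rcases hk with hk | hk
          · subst hk; exact hymem
          · exact hmem k hk
      · rw [if_neg hcy]
        have hgy : gstate a (a.getD (m + 1) 0) (m + 1) = gstate a (a.getD (m + 1) 0) m := by
          rw [gstate_succ, hqy]
          simp only [Bool.true_and]
          rw [if_neg (by rw [← (hget (a.getD (m + 1) 0)).1]; simpa using hcy)]
        refine ⟨?_, hnd, hmem⟩
        intro k
        by_cases hkx : k = a.getD m 0
        · subst hkx
          rw [hgx]; exact hget _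
        · by_cases hky : k = a.getD (m + 1) 0
          · subst hky
            rw [hgy]; exact hget _
          · have hq : ((a.getD m 0 != a.getD (m + 1) 0) && (a.getD m 0 == k
                || a.getD (m + 1) 0 == k)) = false := by
              simp only [Bool.and_eq_false_iff, Bool.or_eq_false_iff, beq_eq_false_iff_ne, ne_eq]
              right
              exact ⟨fun hh => hkx hh.symm, fun hh => hky hh.symm⟩
            rw [gstate_succ_qual_false a k m hq]
            exact hget k
  · rw [if_neg hxy]
    have hq : ∀ k : Int, ((a.getD m 0 != a.getD (m + 1) 0) && (a.getD m 0 == k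
        || a.getD (m + 1) 0 == k)) = false := by
      intro k
      simp only [Bool.not_eq_true] at hxy
      rw [hxy, Bool.false_and]
    refine ⟨?_, hnd, hmem⟩
    intro k
    rw [gstate_succ_qual_false a k m (hq k)]
    exact hget k

theorem alt_fold_inv (a : List Int) (m : Nat) (hm : m ≤ a.length - 1) :
    altInv a m ((List.range m).foldl (altStep a) (PySem.Dict.empty, PySem.Dict.empty)) := by
  induction m with
  | zero =>
    refine ⟨?_, ?_, ?_⟩
    · intro k; simp [gstate, PySem.Dict.getD_empty]
    · simp [PySem.Dict.keys_empty]
    · intro k hk; simp [PySem.Dict.keys_empty] at hk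
  | succ m ih =>
    rw [List.range_succ, List.foldl_append, List.foldl_cons, List.foldl_nil]
    exact altStep_inv a m hm _ (ih (by omega))

-- the count-based prune in A never changes the running maximum
theorem foldl_prune (f c : Int → Int) :
    ∀ (K : List Int) (init : Int), (∀ k ∈ K, f k ≤ c k) →
      K.foldl (fun ans key => if c key ≤ ans then ans else max ans (f key)) init
        = K.foldl (fun ans key => max ans (f key)) init := by
  intro K
  induction K with
  | nil => intro _ _; rfl
  | cons k K ih =>
    intro init hb
    simp only [List.foldl_cons]
    by_cases hc : c k ≤ init
    · rw [if_pos hc, max_eq_left (le_trans (hb k (by simp)) hc)]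
      exact ih _ (fun j hj => hb j (by simp [hj]))
    · rw [if_neg hc]
      exact ih _ (fun j hj => hb j (by simp [hj]))

-- a max-fold over all keys (from -1) equals a max-fold (from 0) over a subset, when the
-- dropped keys all have value 0 and all values are nonnegative
theorem max_fold_eq (f' : Int → Int) (K K' : List Int)
    (h0 : ∀ k, 0 ≤ f' k) (hKne : K ≠ [])
    (hsub : ∀ k ∈ K', k ∈ K) (hzero : ∀ k ∈ K, k ∉ K' → f' k = 0) :
    (K.map f').foldl max (-1) = (K'.map f').foldl max 0 := by
  apply le_antisymm
  · rcases PySem.List.foldl_max_mem (K.map f') (-1) with h | h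
    · rw [h]
      exact le_trans (by norm_num) (PySem.List.le_foldl_max (K'.map f') 0).1
    · obtain ⟨k, hkK, hfk⟩ := List.mem_map.mp h
      rw [← hfk]
      by_cases hk' : k ∈ K'
      · exact (PySem.List.le_foldl_max _ _).2 _ (List.mem_map_of_mem hk')
      · rw [hzero k hkK hk']
        exact (PySem.List.le_foldl_max _ _).1
  · rcases PySem.List.foldl_max_mem (K'.map f') 0 with h | h
    · rw [h]
      obtain ⟨k0, hk0⟩ := List.exists_mem_of_ne_nil K hKne
      exact le_trans (h0 k0) ((PySem.List.le_foldl_max _ _).2 _ (List.mem_map_of_mem hk0))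
    · obtain ⟨k, hkK', hfk⟩ := List.mem_map.mp h
      rw [← hfk]
      exact (PySem.List.le_foldl_max _ _).2 _ (List.mem_map_of_mem (hsub k hkK'))

theorem other_solution_spec' (a : List Int) : other_solution a = other_solution_alt a := by
  by_cases h4 : a.length < 4
  · simp [other_solution, other_solution_alt, h4]
  · have hlen1 : 1 ≤ a.length := by omega
    have hne : a ≠ [] := by
      intro h
      rw [h] at h4
      simp at h4
    have hinv := alt_fold_inv a (a.length - 1) (le_refl _)
    obtain ⟨hget, hnd, hmem⟩ := hinv
    have hbound : ∀ k ∈ (PySem.Dict.counter a).keys,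
        (gstate a k (a.length - 1)).2 ≤ (PySem.Dict.counter a).getD k 0 := by
      intro k _
      rw [PySem.Dict.getD_counter]
      have := (gstate_count_bound a k (a.length - 1) (le_refl _) hlen1).1
      have hidx : a.length - 1 + 1 = a.length := by omega
      rwa [hidx, List.take_length] at this
    have hpl : ∀ k, pairLoop a k 0 0 = (gstate a k (a.length - 1)).2 :=
      fun k => pairLoop_zero a k hlen1
    simp only [other_solution, other_solution_alt, if_neg h4]
    rw [foldl_prune _ _ _ _ (by intro k hk; rw [hpl k]; exact hbound k hk)]
    simp only [hpl]
    rw [PySem.Dict.keys_counter, ← List.foldl_map,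
      PySem.Dict.values_eq_map_keys _ hnd 0,
      List.map_congr_left (fun k _ => (hget k).2)]
    rw [max_fold_eq (fun k => (gstate a k (a.length - 1)).2) (PySem.Set.ofList a) _
      (fun k => gstate_snd_nonneg a k _)
      (by
        obtain ⟨x, hx⟩ := List.exists_mem_of_ne_nil a hne
        exact List.ne_nil_of_mem ((PySem.Set.mem_ofList a x).mpr hx))
      (by
        intro k hk
        exact (PySem.Set.mem_ofList a k).mpr (hmem k hk))
      (by
        intro k _ hk'
        show (gstate a k (a.length - 1)).2 = 0
        rw [← (hget k).2]
        have hn := (PySem.Dict.get?_eq_none_iff_not_mem_keys _ k).mpr hk'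
        simp [PySem.Dict.getD, hn])]
    ring

-- ===== VERDICT (by name: the statement is the Claim_ definition above) =====
theorem other_solution_spec : Claim_equal_other_solution := by
  intro a _
  unfold Spec_other_solution
  exact other_solution_spec' a
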